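-- pv_equiv track=rewrite | github.com/imanesebb/Problem-solving | jeux_N_reines.py | corriger_positions
-- ===== SOURCE A (Python) =====
-- def corriger_positions(position):
--     """Corrige les doublons pour garantir une permutation valide."""
--     n = len(position)
--     vue = set(position)
--     manquantes = [x for x in range(n) if x not in vue]
--
--     for i in range(n):
--         if position.count(position[i]) > 1:
--             position[i] = manquantes.pop()
--
--     return position
-- ===== SOURCE B (Python) =====
-- def corriger_positions(position):
--     """Corrige les doublons pour garantir une permutation valide."""
--     n = len(position)
--     vue = set(position)
--     manquantes = [x for x in range(n) if x not in vue]
--     k = n - len(vue)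
--     it = iter(manquantes[len(manquantes) - k:])
--     out = []
--     seen = set()
--     for v in reversed(position):
--         if v in seen:
--             out.append(next(it))
--         else:
--             seen.add(v)
--             out.append(v)
--     out.reverse()
--     position[:] = out
--     return position
-- ===== Notes on version B (the rewrite author's own statement) =====
-- stated objective: faster
-- what changed: Replaces A's left-to-right loop that re-counts the live list at every index by a single right-to-left pass with a seen-set (keep the first occurrence from the right, i.e. the last one, replace the rest from an iterator over the top slice of the missing values), building a new list instead of testing live counts.
import Mathlib
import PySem

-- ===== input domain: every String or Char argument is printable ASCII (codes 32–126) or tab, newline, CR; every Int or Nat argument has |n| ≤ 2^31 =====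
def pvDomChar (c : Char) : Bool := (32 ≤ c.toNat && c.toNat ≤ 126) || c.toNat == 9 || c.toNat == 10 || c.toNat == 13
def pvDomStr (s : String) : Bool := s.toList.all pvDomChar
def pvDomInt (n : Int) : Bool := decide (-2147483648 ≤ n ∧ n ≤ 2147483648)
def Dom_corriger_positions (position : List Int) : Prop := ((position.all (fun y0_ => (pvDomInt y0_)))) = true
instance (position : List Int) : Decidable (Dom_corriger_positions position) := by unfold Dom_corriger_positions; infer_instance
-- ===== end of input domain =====

-- B replaces A's left-to-right loop with a live position.count(...) test at every index by one
-- right-to-left pass with a seen-set: the first occurrence seen from the right (the last one) is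
-- kept, every other occurrence is replaced from an iterator over the top slice of the missing
-- values. Both Pythons mutate the argument list in place identically; the equivalence proved here
-- is about the return value.

-- ===== PORT A =====
-- one iteration of A's `for i in range(n)` loop over the state (position, manquantes)
def pvStepA (st : List Int × List Int) (i : Int) : List Int × List Int :=
  if PySem.List.count st.1 (PySem.List.pyGetD st.1 i 0) > 1 then
    match PySem.List.pop? st.2 with
    | some (v, man') => (PySem.List.pySetD st.1 i v, man')
    | none => st        -- Python would raise IndexError; never reached from the loop below
  else st

def corriger_positions (position : List Int) : List Int :=
  let n : Int := PySem.List.len position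
  let vue : PySem.Set Int := PySem.Set.ofList position
  let manquantes : List Int :=
    (PySem.List.pyRange 0 n 1).filter (fun x => ! PySem.Set.contains vue x)
  ((PySem.List.pyRange 0 n 1).foldl pvStepA (position, manquantes)).1

-- ===== PORT B =====
-- one iteration of B's `for v in reversed(position)` loop over the state (seen, it, out)
def pvStepB (st : PySem.Set Int × List Int × List Int) (v : Int) :
    PySem.Set Int × List Int × List Int :=
  if PySem.Set.contains st.1 v then
    match st.2.1 with
    | m :: it' => (st.1, it', st.2.2 ++ [m])
    | [] => st          -- next() on an exhausted iterator: StopIteration; never reached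
  else (PySem.Set.add st.1 v, st.2.1, st.2.2 ++ [v])

def corriger_positions_alt (position : List Int) : List Int :=
  let n : Int := PySem.List.len position
  let vue : PySem.Set Int := PySem.Set.ofList position
  let manquantes : List Int :=
    (PySem.List.pyRange 0 n 1).filter (fun x => ! PySem.Set.contains vue x)
  let k : Int := n - PySem.Set.len vue
  let it : List Int := PySem.List.slice manquantes (some (PySem.List.len manquantes - k)) none
  let fin := position.reverse.foldl pvStepB (PySem.Set.empty, it, [])
  fin.2.2.reverse

-- ===== PRECONDITION & SPEC =====
def Spec_corriger_positions (position : List Int) (out : List Int) : Prop := out = corriger_positions_alt position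
instance (position : List Int) (out : List Int) : Decidable (Spec_corriger_positions position out) := by unfold Spec_corriger_positions; infer_instance

-- ===== CLAIM (what is proved, stated in full; the proofs are below) =====
def Claim_equal_corriger_positions : Prop := ∀ (position : List Int), Dom_corriger_positions position → Spec_corriger_positions position (corriger_positions position)

-- ===== LEMMAS AND PROOFS =====

-- number of non-last occurrences in l (= number of replacements both programs perform)
def pvK : List Int → Nat
  | [] => 0
  | v :: rest => (if v ∈ rest then 1 else 0) + pvK rest

-- the common functional core: keep the last occurrence of each value, replace every other
-- element by a value popped from the END of M
def pvF : List Int → List Int → List Int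
  | [], _ => []
  | v :: rest, M =>
    if v ∈ rest then
      match M.getLast? with
      | some m => m :: pvF rest M.dropLast
      | none => v :: pvF rest M
    else v :: pvF rest M

lemma pvK_cons_mem {v : Int} {rest : List Int} (h : v ∈ rest) :
    pvK (v :: rest) = pvK rest + 1 := by simp [pvK, h]; omega

lemma pvK_cons_not_mem {v : Int} {rest : List Int} (h : v ∉ rest) :
    pvK (v :: rest) = pvK rest := by simp [pvK, h]

lemma pvF_cons_mem {v : Int} {rest M' : List Int} (h : v ∈ rest) (m : Int) :
    pvF (v :: rest) (M' ++ [m]) = m :: pvF rest M' := by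
  simp [pvF, h]

lemma pvF_cons_not_mem {v : Int} {rest M : List Int} (h : v ∉ rest) :
    pvF (v :: rest) M = v :: pvF rest M := by simp [pvF, h]

-- pvF only reads the last (pvK l) elements of M
lemma pvFsuffix (l : List Int) : ∀ (pre R : List Int), R.length = pvK l →
    pvF l (pre ++ R) = pvF l R := by
  induction l with
  | nil => intro pre R _; simp [pvF]
  | cons v rest ih =>
    intro pre R hR
    by_cases hv : v ∈ rest
    · rw [pvK_cons_mem hv] at hR
      rcases R.eq_nil_or_concat with rfl | ⟨R', m, rfl⟩
      · exact absurd hR (by simp)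
      · simp only [List.concat_eq_append] at hR ⊢
        rw [← List.append_assoc, pvF_cons_mem hv, pvF_cons_mem hv]
        have hR' : R'.length = pvK rest := by simpa using hR
        rw [ih pre R' hR']
    · rw [pvF_cons_not_mem hv, pvF_cons_not_mem hv,
        ih pre R (by rwa [pvK_cons_not_mem hv] at hR)]

lemma pvSetMid (P rest : List Int) (v m : Int) :
    (P ++ v :: rest).set P.length m = P ++ m :: rest := by
  induction P with
  | nil => rfl
  | cons p P ih => simp [ih]

lemma pvStepA_pop (L M' : List Int) (m : Int) (i : Int)
    (hc : PySem.List.count L (PySem.List.pyGetD L i 0) > 1) :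
    pvStepA (L, M' ++ [m]) i = (PySem.List.pySetD L i m, M') := by
  simp only [pvStepA]
  rw [if_pos hc, PySem.List.pop?_last]

lemma pvStepA_keep (L M : List Int) (i : Int)
    (hc : ¬ PySem.List.count L (PySem.List.pyGetD L i 0) > 1) :
    pvStepA (L, M) i = (L, M) := by
  simp only [pvStepA]
  rw [if_neg hc]

-- A's loop, started at index s from any reachable state, computes pvF of the remaining suffix
lemma pvLoopsA (orig : List Int) (t : Nat) :
    ∀ (s : Nat) (P M : List Int),
    s = P.length → s + t = orig.length →
    (∀ x ∈ P, x ∉ orig.drop s) → (∀ x ∈ M, x ∉ orig) →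
    pvK (orig.drop s) ≤ M.length →
    (((List.range' s t).map (fun (k : Nat) => (k : Int))).foldl pvStepA (P ++ orig.drop s, M)).1
      = P ++ pvF (orig.drop s) M := by
  induction t with
  | zero =>
    intro s P M hsP hst hP hM hk
    have hd : orig.drop s = [] := List.drop_eq_nil_of_le (by omega)
    simp [hd, pvF]
  | succ t ih =>
    intro s P M hsP hst hP hM hk
    have hs : s < orig.length := by omega
    have hdrop : orig.drop s = orig[s] :: orig.drop (s + 1) := List.drop_eq_getElem_cons hs
    obtain ⟨v, hv⟩ : ∃ v, orig[s] = v := ⟨_, rfl⟩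
    rw [hv] at hdrop
    rw [List.range'_succ, List.map_cons, List.foldl_cons]
    have hget : PySem.List.pyGetD (P ++ orig.drop s) (s : Int) 0 = v := by
      rw [PySem.List.pyGetD_natCast, hdrop, hsP]
      simp [List.getD]
    have hvP : v ∉ P := fun hin => hP _ hin (by rw [hdrop]; exact List.mem_cons_self ..)
    have hcount : PySem.List.count (P ++ orig.drop s) v
        = 1 + (orig.drop (s + 1)).count v := by
      rw [PySem.List.count_eq, List.count_append, List.count_eq_zero.mpr hvP, hdrop,
        List.count_cons_self]
      omega
    have hcondA : (PySem.List.count (P ++ orig.drop s) v > 1)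
        ↔ v ∈ orig.drop (s + 1) := by
      rw [hcount, ← List.count_pos_iff]
      omega
    have hsub1 : ∀ x, x ∈ orig.drop (s + 1) → x ∈ orig.drop s := by
      intro x hx
      rw [hdrop]
      exact List.mem_cons_of_mem _ hx
    by_cases hmem : v ∈ orig.drop (s + 1)
    · -- not the last occurrence of v: replaced by the last element of M
      have hkd : pvK (orig.drop s) = pvK (orig.drop (s + 1)) + 1 := by
        rw [hdrop]; exact pvK_cons_mem hmem
      have hMne : M ≠ [] := by
        intro h
        rw [h] at hk
        simp [hkd] at hk
      rcases M.eq_nil_or_concat with rfl | ⟨M', m, rfl⟩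
      · exact absurd rfl hMne
      simp only [List.concat_eq_append] at hM hk ⊢
      rw [pvStepA_pop _ _ _ _ (by rw [hget]; exact hcondA.mpr hmem)]
      have hstate : PySem.List.pySetD (P ++ orig.drop s) (s : Int) m
          = (P ++ [m]) ++ orig.drop (s + 1) := by
        rw [PySem.List.pySetD_natCast, hdrop, hsP, pvSetMid]
        simp
      rw [hstate]
      have hres := ih (s + 1) (P ++ [m]) M'
        (by simp [hsP])
        (by omega)
        (by
          intro x hx
          rcases List.mem_append.mp hx with hx | hx
          · exact fun hc => hP x hx (hsub1 x hc)
          · simp only [List.mem_singleton] at hx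
            subst hx
            exact fun hc => hM x (by simp) (List.mem_of_mem_drop hc))
        (fun x hx => hM x (by simp [hx]))
        (by simp at hk ⊢; omega)
      rw [hres, hdrop, pvF_cons_mem hmem]
      simp
    · -- last occurrence of v: kept
      have hkd : pvK (orig.drop s) = pvK (orig.drop (s + 1)) := by
        rw [hdrop]; exact pvK_cons_not_mem hmem
      rw [pvStepA_keep _ _ _ (by rw [hget]; exact fun hcc => hmem (hcondA.mp hcc))]
      have hre : P ++ orig.drop s = (P ++ [v]) ++ orig.drop (s + 1) := by
        rw [hdrop]
        simp
      rw [hre]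
      have hres := ih (s + 1) (P ++ [v]) M
        (by simp [hsP])
        (by omega)
        (by
          intro x hx
          rcases List.mem_append.mp hx with hx | hx
          · exact fun hc => hP x hx (hsub1 x hc)
          · simp only [List.mem_singleton] at hx
            subst hx
            exact hmem)
        hM
        (by omega)
      rw [hres, hdrop, pvF_cons_not_mem hmem]
      simp

lemma pvContains_iff (s : PySem.Set Int) (x : Int) :
    PySem.Set.contains s x = decide (x ∈ s) := by
  simp [PySem.Set.contains]

lemma pvContains_add (s : PySem.Set Int) (v x : Int) :
    PySem.Set.contains (PySem.Set.add s v) x = (PySem.Set.contains s x || decide (x = v)) := by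
  rw [pvContains_iff, pvContains_iff]
  by_cases h : x ∈ PySem.Set.add s v
  · rcases (PySem.Set.mem_add s v x).mp h with h' | h' <;> simp [h, h']
  · have h1 : ¬ x ∈ s := fun hc => h ((PySem.Set.mem_add s v x).mpr (Or.inl hc))
    have h2 : ¬ x = v := fun hc => h ((PySem.Set.mem_add s v x).mpr (Or.inr hc))
    simp [h, h1, h2]

-- B's reverse pass, from a seen-set disjoint from l and an iterator holding exactly the
-- pvK l replacement values (followed by anything), computes pvF l R in reverse
lemma pvBrec (l : List Int) : ∀ (R extra out : List Int) (seen : PySem.Set Int),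
    (∀ x ∈ l, PySem.Set.contains seen x = false) → R.length = pvK l →
    ∃ seen' : PySem.Set Int,
      (∀ x, PySem.Set.contains seen' x
          = (PySem.Set.contains seen x || decide (x ∈ l))) ∧
      l.reverse.foldl pvStepB (seen, R ++ extra, out)
        = (seen', extra, out ++ (pvF l R).reverse) := by
  induction l with
  | nil =>
    intro R extra out seen hseen hR
    have : R = [] := List.eq_nil_of_length_eq_zero (by simpa [pvK] using hR)
    subst this
    exact ⟨seen, by simp, by simp [pvF]⟩
  | cons v rest ih =>
    intro R extra out seen hseen hR
    have hseen' : ∀ x ∈ rest, PySem.Set.contains seen x = false :=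
      fun x hx => hseen x (List.mem_cons_of_mem _ hx)
    rw [List.reverse_cons, List.foldl_append]
    by_cases hv : v ∈ rest
    · rw [pvK_cons_mem hv] at hR
      rcases R.eq_nil_or_concat with rfl | ⟨R', m, rfl⟩
      · simp at hR
      simp only [List.concat_eq_append] at hR ⊢
      have hR' : R'.length = pvK rest := by simpa using hR
      obtain ⟨seen', hc, hfold⟩ := ih R' ([m] ++ extra) out seen hseen' hR'
      rw [List.append_assoc, hfold]
      have hcv : PySem.Set.contains seen' v = true := by
        rw [hc v, hseen v (List.mem_cons_self ..)]
        simp [hv]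
      refine ⟨seen', ?_, ?_⟩
      · intro x
        rw [hc x]
        by_cases hxv : x = v
        · subst hxv
          simp [hv]
        · simp [hxv]
      · simp only [List.foldl_cons, List.foldl_nil, pvStepB, hcv, if_pos]
        rw [pvF_cons_mem hv]
        simp
    · rw [pvK_cons_not_mem hv] at hR
      obtain ⟨seen', hc, hfold⟩ := ih R extra out seen hseen' hR
      rw [hfold]
      have hcv : PySem.Set.contains seen' v = false := by
        rw [hc v, hseen v (List.mem_cons_self ..)]
        simp [hv]
      refine ⟨PySem.Set.add seen' v, ?_, ?_⟩
      · intro x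
        rw [pvContains_add, hc x]
        by_cases hxv : x = v
        · subst hxv
          simp
        · simp [hxv]
      · simp only [List.foldl_cons, List.foldl_nil, pvStepB, hcv]
        rw [if_neg (by simp), pvF_cons_not_mem hv]
        simp

-- counting: replacements + distinct values = length
lemma pvK_add_card (l : List Int) : pvK l + l.toFinset.card = l.length := by
  induction l with
  | nil => simp [pvK]
  | cons v rest ih =>
    by_cases hv : v ∈ rest
    · rw [pvK_cons_mem hv, List.toFinset_cons,
        Finset.insert_eq_self.mpr (List.mem_toFinset.mpr hv)]
      simp at ih ⊢
      omega
    · rw [pvK_cons_not_mem hv, List.toFinset_cons,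
        Finset.card_insert_of_notMem (fun hc => hv (List.mem_toFinset.mp hc))]
      simp at ih ⊢
      omega

lemma pvOfList_length (l : List Int) :
    (PySem.Set.ofList l : List Int).length = l.toFinset.card := by
  have hn : (PySem.Set.ofList l : List Int).Nodup := PySem.Set.nodup_ofList l
  have ht : (PySem.Set.ofList l : List Int).toFinset = l.toFinset := by
    ext x
    simp [List.mem_toFinset, PySem.Set.mem_ofList]
  rw [← List.toFinset_card_of_nodup hn, ht]

-- ===== VERDICT (by name: the statement is the Claim_ definition above) =====
theorem corriger_positions_spec : Claim_equal_corriger_positions := by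
  intro position _
  unfold Spec_corriger_positions corriger_positions corriger_positions_alt
  simp only []
  set n : Int := PySem.List.len position with hn
  set vue : PySem.Set Int := PySem.Set.ofList position with hvue
  set manquantes : List Int :=
    (PySem.List.pyRange 0 n 1).filter (fun x => ! PySem.Set.contains vue x) with hman
  -- facts about manquantes
  have hMnotin : ∀ x ∈ manquantes, x ∉ position := by
    intro x hx
    have := List.of_mem_filter hx
    simp only [Bool.not_eq_eq_eq_not, Bool.not_true] at this
    rw [pvContains_iff] at this
    intro hc
    simp [hvue, PySem.Set.mem_ofList, hc] at this
  -- counting: pvK position ≤ manquantes.length and the slice has exactly pvK position elements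
  have hrange : PySem.List.pyRange 0 n 1
      = (List.range position.length).map (fun (k : Nat) => (k : Int)) := by
    rw [PySem.List.pyRange_one]
    simp [hn, PySem.List.len_eq]
  have hsplit : (PySem.List.pyRange 0 n 1).length
      = manquantes.length
        + ((PySem.List.pyRange 0 n 1).filter (fun x => PySem.Set.contains vue x)).length := by
    rw [hman]
    have h := List.length_eq_length_filter_add (l := PySem.List.pyRange 0 n 1)
      (f := fun x => PySem.Set.contains vue x)
    omega
  have hinlen : ((PySem.List.pyRange 0 n 1).filter (fun x => PySem.Set.contains vue x)).length
      ≤ position.toFinset.card := by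
    set f := (PySem.List.pyRange 0 n 1).filter (fun x => PySem.Set.contains vue x) with hf
    have hnd : f.Nodup := List.Nodup.filter _ (by
      rw [hrange]
      exact (List.nodup_range).map (fun a b => by exact_mod_cast fun h => h))
    have hsub : f.toFinset ⊆ position.toFinset := by
      intro x hx
      rw [List.mem_toFinset] at hx ⊢
      have := List.of_mem_filter hx
      rw [pvContains_iff] at this
      have : x ∈ vue := by simpa using this
      exact (PySem.Set.mem_ofList position x).mp this
    calc f.length = f.toFinset.card := (List.toFinset_card_of_nodup hnd).symm
      _ ≤ position.toFinset.card := Finset.card_le_card hsub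
  have hlenrange : (PySem.List.pyRange 0 n 1).length = position.length := by
    rw [hrange]; simp
  have hkcard := pvK_add_card position
  have hkle : pvK position ≤ manquantes.length := by omega
  -- the slice manquantes[len(manquantes) - k :]
  have hkval : n - PySem.Set.len vue = (pvK position : Int) := by
    rw [hvue, PySem.Set.len, pvOfList_length, hn, PySem.List.len_eq]
    omega
  have hslice : PySem.List.slice manquantes
      (some (PySem.List.len manquantes - (n - PySem.Set.len vue))) none
      = manquantes.drop (manquantes.length - pvK position) := by
    rw [hkval, PySem.List.len_eq,
      PySem.List.slice_from manquantes (by omega)]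
    congr 1
    omega
  set R : List Int := manquantes.drop (manquantes.length - pvK position) with hRdef
  have hRlen : R.length = pvK position := by
    rw [hRdef, List.length_drop]
    omega
  -- A's side
  have hA : ((PySem.List.pyRange 0 n 1).foldl pvStepA (position, manquantes)).1
      = pvF position manquantes := by
    have hmain := pvLoopsA position position.length 0 [] manquantes
      rfl (by omega) (by simp) hMnotin (by simpa using hkle)
    simp only [List.nil_append, List.drop_zero] at hmain
    rw [hrange, List.range_eq_range']
    exact hmain
  -- B's side
  have hB : ∃ seen', position.reverse.foldl pvStepB (PySem.Set.empty, R, [])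
      = (seen', [], ([] : List Int) ++ (pvF position R).reverse) := by
    obtain ⟨seen', _, hfold⟩ := pvBrec position R [] [] PySem.Set.empty
      (by intro x _; simp [PySem.Set.contains, PySem.Set.empty]) hRlen
    exact ⟨seen', by simpa using hfold⟩
  obtain ⟨seen', hB⟩ := hB
  rw [hA, hslice, hB]
  simp only [List.nil_append, List.reverse_reverse]
  -- pvF only depends on the last pvK elements
  have htd : manquantes = manquantes.take (manquantes.length - pvK position) ++ R := by
    rw [hRdef, List.take_append_drop]
  rw [htd, pvFsuffix position _ R hRlen]
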